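-- pv_equiv track=rewrite | github.com/alexandraback/datacollection | solutions_5634697451274240_1/Python/dummymon/pancake.py | flipping
-- ===== SOURCE A (Python) =====
-- def flipping(flipstack,flips):
--     lasthappy = -1
--     for i , pancake in enumerate(flipstack):
--         if pancake =="+":
--             lasthappy = i
--             break
--     if lasthappy == -1:
--         return(flips)
--     flipthis = flipstack[lasthappy:]
--     flipstack = []
--     for i in flipthis:
--         if i == "-":
--             flipstack.append("+")
--         else:
--             flipstack.append("-")
--     flips += 1
--     flips = flipping(flipstack,flips)
--     return (flips)
-- ===== SOURCE B (Python) =====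
-- def flipping(flipstack, flips):
--     # Locate the first "+", then count boolean runs in the suffix in one pass.
--     # Each recursion step of the naive version removes exactly one run.
--     try:
--         i = flipstack.index("+")
--     except ValueError:
--         return flips
--     count = 1
--     prev = True
--     for s in flipstack[i + 1:]:
--         cur = (s != "-")
--         if cur != prev:
--             count += 1
--         prev = cur
--     return flips + count
-- ===== Notes on version B (the rewrite author's own statement) =====
-- stated objective: simpler
-- what changed: Replaces the recursive flip-and-rescan (rebuilding a flipped copy of the suffix each step) by a single non-recursive pass that finds the first "+" and counts boolean runs in the suffix; the run count equals the number of flips.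
import Mathlib
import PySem

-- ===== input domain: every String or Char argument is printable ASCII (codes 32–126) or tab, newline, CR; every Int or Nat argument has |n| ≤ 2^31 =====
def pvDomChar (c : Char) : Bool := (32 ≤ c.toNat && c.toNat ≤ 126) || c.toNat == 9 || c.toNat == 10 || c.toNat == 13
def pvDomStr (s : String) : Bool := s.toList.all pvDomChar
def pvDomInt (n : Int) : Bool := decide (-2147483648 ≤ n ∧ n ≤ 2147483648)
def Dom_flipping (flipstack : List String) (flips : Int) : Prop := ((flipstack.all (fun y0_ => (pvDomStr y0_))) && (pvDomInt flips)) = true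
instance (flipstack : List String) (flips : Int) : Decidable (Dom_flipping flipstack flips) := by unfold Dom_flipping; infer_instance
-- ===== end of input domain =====

-- B replaces A's recursive flip-and-rescan by one non-recursive pass counting boolean
-- runs after the first "+" (objective: simpler).

-- ===== PORT A =====
-- the first 'for' loop of A: index of the first "+", or -1
def flipFindHappy : List String → Int → Int
  | [], _ => -1
  | p :: rest, i => if p = "+" then i else flipFindHappy rest (i + 1)

-- one appended element of A's second loop
def flipOne (i : String) : String := if i = "-" then "+" else "-"

-- A's second loop: rebuild the list, appending the flipped pancake each step
def flipFlipLoop (flipthis : List String) : List String :=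
  flipthis.foldl (fun acc i => acc ++ [flipOne i]) []

-- termination measure for A's recursion (used only in decreasing_by)
def flipMeasure (xs : List String) : Nat :=
  2 * xs.length + (if xs.head? = some "+" then 1 else 0)

def flippingGo : Nat → List String → Int → Int
  | 0, _, flips => flips   -- fuel guard only; never reached (fuel = flipMeasure + 1 suffices)
  | Nat.succ fuel, flipstack, flips =>
    -- lasthappy = -1; for i,pancake in enumerate(...): if pancake == "+": lasthappy = i; break
    let lasthappy := flipFindHappy flipstack 0
    if lasthappy = -1 then flips
    else
      -- flipthis = flipstack[lasthappy:]
      let flipthis := PySem.List.slice flipstack (some lasthappy) none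
      -- flipstack = []; for i in flipthis: append the flipped pancake
      let flipstack2 := flipFlipLoop flipthis
      -- flips += 1; flips = flipping(flipstack, flips)
      flippingGo fuel flipstack2 (flips + 1)

def flipping (flipstack : List String) (flips : Int) : Int :=
  flippingGo (flipMeasure flipstack + 1) flipstack flips

-- ===== PORT B =====
def flipping_alt (flipstack : List String) (flips : Int) : Int :=
  match PySem.List.index? flipstack "+" with
  | none => flips                      -- except ValueError: return flips
  | some i =>
    -- count = 1; prev = True; for s in flipstack[i+1:]: ...
    let st := (PySem.List.slice flipstack (some ((i : Int) + 1)) none).foldl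
      (fun (st : Int × Bool) s =>
        let cur := s != "-"
        (if cur != st.2 then st.1 + 1 else st.1, cur)) (1, true)
    flips + st.1

-- ===== PRECONDITION & SPEC =====
def Spec_flipping (flipstack : List String) (flips : Int) (out : Int) : Prop := out = flipping_alt flipstack flips
instance (flipstack : List String) (flips : Int) (out : Int) : Decidable (Spec_flipping flipstack flips out) := by unfold Spec_flipping; infer_instance

-- ===== CLAIM (what is proved, stated in full; the proofs are below) =====
def Claim_equal_flipping : Prop := ∀ (flipstack : List String) (flips : Int), Dom_flipping flipstack flips → Spec_flipping flipstack flips (flipping flipstack flips)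

-- ===== LEMMAS AND PROOFS =====

theorem flipFindHappy_none (xs : List String) (h : PySem.List.index? xs "+" = none) :
    flipFindHappy xs 0 = -1 := by
  rw [PySem.List.index?_eq_none_iff] at h
  induction xs with
  | nil => rfl
  | cons p rest ih =>
    have hp : p ≠ "+" := fun hc => h (by simp [hc])
    have hrest : "+" ∉ rest := fun hc => h (by simp [hc])
    -- flipFindHappy is independent of the start index when no "+" occurs
    have aux : ∀ (l : List String) (i : Int), "+" ∉ l → flipFindHappy l i = -1 := by
      intro l
      induction l with
      | nil => intro i _; rfl
      | cons q t ihq =>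
        intro i hmem
        have hq : q ≠ "+" := fun hc => hmem (by simp [hc])
        simp only [flipFindHappy, if_neg hq]
        exact ihq (i + 1) (fun hc => hmem (by simp [hc]))
    exact aux (p :: rest) 0 h

theorem flipFindHappy_some : ∀ (xs : List String) (k : Nat) (i : Int),
    PySem.List.index? xs "+" = some k → flipFindHappy xs i = i + (k : Int) := by
  intro xs
  induction xs with
  | nil => intro k i h; simp [PySem.List.index?_eq_idxOf?, List.idxOf?] at h
  | cons p rest ih =>
    intro k i h
    by_cases hp : p = "+"
    · subst hp
      rw [PySem.List.index?_cons_self] at h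
      cases h
      simp [flipFindHappy]
    · rw [PySem.List.index?_cons_of_ne rest hp] at h
      cases hr : PySem.List.index? rest "+" with
      | none => rw [hr] at h; simp at h
      | some m =>
        rw [hr] at h
        simp only [Option.map_some, Option.some.injEq] at h
        subst h
        simp only [flipFindHappy, if_neg hp]
        rw [ih m (i + 1) hr]
        push_cast; ring

theorem flipFlipLoop_eq_map_aux : ∀ (l : List String) (acc : List String),
    l.foldl (fun acc i => acc ++ [flipOne i]) acc = acc ++ l.map flipOne := by
  intro l
  induction l with
  | nil => intro acc; simp
  | cons x t ih => intro acc; simp [List.foldl, ih]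

theorem flipFlipLoop_eq_map (l : List String) : flipFlipLoop l = l.map flipOne := by
  rw [flipFlipLoop, flipFlipLoop_eq_map_aux, List.nil_append]

theorem flipping_measure_lt (xs : List String) (h : ¬ flipFindHappy xs 0 = -1) :
    flipMeasure (flipFlipLoop (PySem.List.slice xs (some (flipFindHappy xs 0)) none)) <
      flipMeasure xs := by
  cases hidx : PySem.List.index? xs "+" with
  | none => exact absurd (flipFindHappy_none xs hidx) h
  | some k =>
    rw [flipFindHappy_some xs k 0 hidx, zero_add]
    have hsome := (PySem.List.index?_eq_some_iff xs "+" k).mp hidx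
    obtain ⟨pre, suf, hxs, hlen, _⟩ := hsome
    rw [PySem.List.slice_from_natCast]
    subst hxs
    have hdrop : (pre ++ "+" :: suf).drop k = "+" :: suf := by
      rw [← hlen]; exact List.drop_left
    rw [hdrop, flipFlipLoop_eq_map]
    simp only [List.map_cons, show flipOne "+" = "-" from by decide]
    cases hk : k with
    | zero =>
      have : pre = [] := by subst hk; simpa using hlen
      subst this
      simp [flipMeasure]
    | succ m =>
      subst hk
      simp only [flipMeasure, List.length_cons, List.length_append, List.length_map]
      split_ifs <;> simp_all

theorem drop_len_cons {α : Type} (pre suf : List α) (v : α) :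
    (pre ++ v :: suf).drop (pre.length + 1) = suf := by
  rw [show pre.length + 1 = (pre ++ [v]).length by simp]
  rw [show pre ++ v :: suf = (pre ++ [v]) ++ suf by simp]
  exact List.drop_left

-- normalisation used by B: a pancake is "happy-side up" unless it is exactly "-"
def bfn (s : String) : Bool := s != "-"

-- number of sign changes relative to a previous value
def transCnt : Bool → List Bool → Int
  | _, [] => 0
  | p, b :: t => (if b ≠ p then 1 else 0) + transCnt b t

-- the common closed form: 0 if no "+", else 1 + #transitions after the first "+"
def runCnt (xs : List String) : Int :=
  (PySem.List.index? xs "+").elim 0 (fun k => 1 + transCnt true ((xs.drop (k + 1)).map bfn))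

theorem transCnt_append_all (p : Bool) : ∀ (a l : List Bool), (∀ b ∈ a, b = p) →
    transCnt p (a ++ l) = transCnt p l := by
  intro a
  induction a with
  | nil => intro l _; simp
  | cons x t ih =>
    intro l h
    have hx : x = p := h x (by simp)
    subst hx
    simp only [List.cons_append, transCnt]
    rw [ih l (fun b hb => h b (by simp [hb]))]
    simp

theorem transCnt_all (p : Bool) (l : List Bool) (h : ∀ b ∈ l, b = p) :
    transCnt p l = 0 := by
  simpa using transCnt_append_all p l [] h

theorem transCnt_map_not : ∀ (l : List Bool) (p : Bool),
    transCnt p l = transCnt (!p) (l.map (fun b => !b)) := by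
  intro l
  induction l with
  | nil => intro p; simp [transCnt]
  | cons b t ih =>
    intro p
    simp only [List.map_cons, transCnt, ← ih b]
    congr 1
    cases b <;> cases p <;> decide

theorem bfn_flipOne (s : String) : bfn (flipOne s) = !(bfn s) := by
  unfold bfn flipOne
  by_cases h : s = "-" <;> simp [h]

-- key step: flipping the suffix (which starts with "+") removes exactly one run
theorem runCnt_flip (suf : List String) :
    runCnt ("-" :: suf.map flipOne) = transCnt true (suf.map bfn) := by
  unfold runCnt
  have hne : ("-" : String) ≠ "+" := by decide
  rw [PySem.List.index?_cons_of_ne (suf.map flipOne) hne]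
  cases hidx : PySem.List.index? (suf.map flipOne) "+" with
  | none =>
    rw [PySem.List.index?_eq_none_iff] at hidx
    simp only [Option.map_none, Option.elim_none]
    have hall : ∀ b ∈ suf.map bfn, b = true := by
      intro b hb
      rw [List.mem_map] at hb
      obtain ⟨s, hs, rfl⟩ := hb
      have hnp : flipOne s ≠ "+" := fun hc => hidx (hc ▸ List.mem_map_of_mem hs)
      unfold flipOne at hnp
      unfold bfn
      by_cases h : s = "-"
      · exact absurd (by simp [h]) hnp
      · simp [h]
    rw [transCnt_all true _ hall]
  | some j =>
    simp only [Option.map_some, Option.elim_some]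
    obtain ⟨pre2, suf2, heq, hlen2, hnp⟩ := (PySem.List.index?_eq_some_iff _ "+" j).mp hidx
    obtain ⟨a, rest, hsuf, ha, hrest⟩ := List.map_eq_append_iff.mp heq
    obtain ⟨b, c, hbc, hb, hc⟩ := List.map_eq_cons_iff.mp hrest
    have hbneg : b = "-" := by
      unfold flipOne at hb
      by_cases h : b = "-"
      · exact h
      · rw [if_neg h] at hb; exact absurd hb (by decide)
    have hdropL : ("-" :: suf.map flipOne).drop (j + 1 + 1) = suf2 := by
      simp only [List.drop_succ_cons, heq, ← hlen2]
      exact drop_len_cons pre2 suf2 "+"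
    rw [hdropL]
    have hatrue : ∀ x ∈ a.map bfn, x = true := by
      intro x hx
      rw [List.mem_map] at hx
      obtain ⟨s, hs, rfl⟩ := hx
      have hsp : flipOne s ∈ pre2 := ha ▸ List.mem_map_of_mem hs
      have hne2 : flipOne s ≠ "+" := fun hcon => hnp (hcon ▸ hsp)
      unfold flipOne at hne2
      unfold bfn
      by_cases h : s = "-"
      · exact absurd (by simp [h]) hne2
      · simp [h]
    rw [hsuf, hbc]
    simp only [List.map_append, List.map_cons]
    rw [transCnt_append_all true _ _ hatrue]
    have hbf : bfn b = false := by simp [hbneg, bfn]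
    rw [hbf]
    simp only [transCnt]
    have hneg : transCnt false (c.map bfn) = transCnt true ((c.map bfn).map (fun x => !x)) := by
      simpa using transCnt_map_not (c.map bfn) false
    have hsuf2 : suf2.map bfn = (c.map bfn).map (fun x => !x) := by
      rw [← hc]
      simp only [List.map_map]
      apply List.map_congr_left
      intro s _
      simp [Function.comp, bfn_flipOne]
    rw [hsuf2, ← hneg]
    simp

-- A computes flips + runCnt (the fuel never runs out)
theorem flippingGo_eq : ∀ (n : Nat) (xs : List String) (f : Int),
    flipMeasure xs < n → flippingGo n xs f = f + runCnt xs := by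
  intro n
  induction n with
  | zero => intro xs f h; omega
  | succ n ih =>
    intro xs f hm
    rw [flippingGo]
    by_cases h : flipFindHappy xs 0 = -1
    · rw [if_pos h]
      cases hidx : PySem.List.index? xs "+" with
      | none => unfold runCnt; rw [hidx]; simp
      | some k =>
        rw [flipFindHappy_some xs k 0 hidx] at h
        omega
    · rw [if_neg h]
      have hlt := flipping_measure_lt xs h
      rw [ih _ (f + 1) (by omega)]
      cases hidx : PySem.List.index? xs "+" with
      | none => exact absurd (flipFindHappy_none xs hidx) h
      | some k =>
        rw [flipFindHappy_some xs k 0 hidx, zero_add]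
        obtain ⟨pre, suf, hxs, hlen, _⟩ := (PySem.List.index?_eq_some_iff xs "+" k).mp hidx
        rw [PySem.List.slice_from_natCast]
        have hdrop : xs.drop k = "+" :: suf := by
          rw [hxs, ← hlen]; exact List.drop_left
        rw [hdrop, flipFlipLoop_eq_map]
        simp only [List.map_cons, show flipOne "+" = "-" from by decide]
        rw [runCnt_flip]
        have hdrop1 : xs.drop (k + 1) = suf := by
          rw [hxs, ← hlen]; exact drop_len_cons pre suf "+"
        unfold runCnt
        rw [hidx]
        simp only [Option.elim_some]
        rw [hdrop1]
        ring

theorem flipping_eq_runCnt (xs : List String) (f : Int) :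
    flipping xs f = f + runCnt xs := by
  unfold flipping
  exact flippingGo_eq (flipMeasure xs + 1) xs f (by omega)

-- B's fold computes the transition count
theorem foldl_count : ∀ (l : List String) (c : Int) (p : Bool),
    (l.foldl (fun (st : Int × Bool) s =>
        let cur := s != "-"
        (if cur != st.2 then st.1 + 1 else st.1, cur)) (c, p)).1
      = c + transCnt p (l.map bfn) := by
  intro l
  induction l with
  | nil => intro c p; simp [transCnt]
  | cons s t ih =>
    intro c p
    simp only [List.foldl, List.map_cons, transCnt]
    rw [ih]
    unfold bfn
    by_cases h : (s != "-") = p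
    · rw [h]
      simp
    · have h1 : ((s != "-") != p) = true := by
        cases hb : (s != "-") <;> cases p <;> simp_all
      rw [h1, if_pos h]
      simp
      ring

-- B computes flips + runCnt
theorem flipping_alt_eq_runCnt (xs : List String) (f : Int) :
    flipping_alt xs f = f + runCnt xs := by
  unfold flipping_alt runCnt
  cases hidx : PySem.List.index? xs "+" with
  | none => simp
  | some k =>
    simp only [Option.elim_some]
    rw [show ((k : Int) + 1) = ((k + 1 : Nat) : Int) by push_cast; ring]
    rw [PySem.List.slice_from_natCast, foldl_count]

-- ===== VERDICT (by name: the statement is the Claim_ definition above) =====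
theorem flipping_spec : Claim_equal_flipping := by
  intro xs f _
  unfold Spec_flipping
  rw [flipping_alt_eq_runCnt, flipping_eq_runCnt]
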